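-- pv_equiv track=rewrite | github.com/DistantJragon/transforming-nested-lists | transformingNestedLists.py | rotate_nested_lists
-- ===== SOURCE A (Python) =====
-- def rotate_nested_lists(givenList, numberOfRotations):
--
--     givenNumberOfRows = len(givenList)
--     givenNumberOfColumns = len(givenList[0])
--
--     rotatedNestedList = []
--     rotatedNumberOfRows = givenNumberOfColumns
--     rotatedNumberOfColumns = givenNumberOfRows
--
--     # simplify #OfRots
--     numberOfRotations %= 4
--     if (numberOfRotations < 0): numberOfRotations += 4
--
--     if (numberOfRotations > 0):
--         for j in range(rotatedNumberOfRows):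
--             rotatedNestedList.append([])
--             for k in range(rotatedNumberOfColumns):
--                 rotatedNestedList[j].append(givenList[givenNumberOfRows - k - 1][j])
--         numberOfRotations -= 1
--         rotatedNestedList = rotate_nested_lists(rotatedNestedList, numberOfRotations)
--     else: rotatedNestedList = givenList
--
--     return rotatedNestedList
-- ===== SOURCE B (Python) =====
-- def rotate_nested_lists(givenList, numberOfRotations):
--     cur = givenList
--     for _ in range(numberOfRotations % 4):
--         cur = [list(row) for row in zip(*reversed(cur))]
--     return cur
-- ===== Notes on version B (the rewrite author's own statement) =====
-- stated objective: idiomatic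
-- what changed: Replaces A's tail recursion that rebuilds each rotation element-by-element with Python-level index arithmetic by an iterative loop running numberOfRotations % 4 times whose step is the idiomatic zip(*reversed(cur)) rotation (C-level traversal, hence a constant-factor speedup).
-- outside the precondition, e.g. on rotate_nested_lists([[1, 2], [3]], 1): A raises IndexError, B returns [[3, 1]]; on rotate_nested_lists([[]], 1): A raises IndexError, B returns []
import Mathlib
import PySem

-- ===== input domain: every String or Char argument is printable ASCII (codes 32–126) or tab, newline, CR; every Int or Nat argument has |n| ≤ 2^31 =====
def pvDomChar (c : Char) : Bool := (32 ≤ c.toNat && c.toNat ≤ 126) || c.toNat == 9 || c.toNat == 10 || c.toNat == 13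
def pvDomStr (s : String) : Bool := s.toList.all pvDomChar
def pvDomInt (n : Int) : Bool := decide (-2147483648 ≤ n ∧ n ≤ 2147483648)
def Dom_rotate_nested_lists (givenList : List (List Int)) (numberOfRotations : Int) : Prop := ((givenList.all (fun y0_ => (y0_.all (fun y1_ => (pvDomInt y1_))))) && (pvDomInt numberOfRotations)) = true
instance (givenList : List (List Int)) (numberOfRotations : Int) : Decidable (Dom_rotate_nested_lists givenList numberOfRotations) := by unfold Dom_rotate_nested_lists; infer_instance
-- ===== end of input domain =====

-- B replaces A's tail recursion (rebuild-by-index each call) with an idiomatic loop rotating via zip(*reversed(cur)); same value wherever A returns.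


-- ===== PORT A =====
-- literal transliteration of A: recursive, rebuilds the rotated matrix by index then recurses with n-1
def rotate_nested_lists (givenList : List (List Int)) (numberOfRotations : Int) : List (List Int) :=
  let givenNumberOfRows : Int := givenList.length
  let givenNumberOfColumns : Int := ((PySem.List.pyGet? givenList 0).getD []).length
  let rotatedNumberOfRows := givenNumberOfColumns
  let rotatedNumberOfColumns := givenNumberOfRows
  let n0 := PySem.Int.mod numberOfRotations 4
  let n := if n0 < 0 then n0 + 4 else n0
  if 0 < n then
    let rotated := (PySem.List.pyRange 0 rotatedNumberOfRows 1).map (fun j =>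
      (PySem.List.pyRange 0 rotatedNumberOfColumns 1).map (fun k =>
        PySem.List.pyGetD (PySem.List.pyGetD givenList (givenNumberOfRows - k - 1) []) j 0))
    rotate_nested_lists rotated (n - 1)
  else givenList
termination_by (PySem.Int.mod numberOfRotations 4).toNat
decreasing_by
  have h0 := PySem.Int.mod_nonneg numberOfRotations (b := 4) (by norm_num)
  have h1 := PySem.Int.mod_lt numberOfRotations (b := 4) (by norm_num)
  have h2 : 0 < if PySem.Int.mod numberOfRotations 4 < 0 then PySem.Int.mod numberOfRotations 4 + 4 else PySem.Int.mod numberOfRotations 4 := by assumption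
  rw [if_neg (show ¬(PySem.Int.mod numberOfRotations 4 < 0) by omega)] at h2
  show (PySem.Int.mod ((if PySem.Int.mod numberOfRotations 4 < 0 then PySem.Int.mod numberOfRotations 4 + 4 else PySem.Int.mod numberOfRotations 4) - 1) 4).toNat < (PySem.Int.mod numberOfRotations 4).toNat
  rw [if_neg (show ¬(PySem.Int.mod numberOfRotations 4 < 0) by omega),
    PySem.Int.mod_eq_emod_of_pos (show (0:Int) < 4 by norm_num)]
  omega

-- ===== PORT B =====
-- hand-ported helper, exact semantics of Python's zip(*xss) for lists of int lists:
-- takes heads while every list is nonempty (zip stops at the shortest input).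
-- The Nat fuel (the first list's length) only bounds the iteration count so the
-- recursion is structural; it never changes the computed value.
def pyZipStarGo : Nat → List (List Int) → List (List Int)
  | 0, _ => []
  | fuel + 1, xss =>
    if xss ≠ [] ∧ xss.all (fun xs => !xs.isEmpty) then
      (xss.map (fun xs => xs.headD 0)) :: pyZipStarGo fuel (xss.map List.tail)
    else []

def pyZipStar (xss : List (List Int)) : List (List Int) :=
  pyZipStarGo (xss.headD []).length xss

-- port of Source B: loop numberOfRotations % 4 times, each step cur = zip(*reversed(cur))
def rotate_nested_lists_alt (givenList : List (List Int)) (numberOfRotations : Int) : List (List Int) :=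
  (PySem.List.pyRange 0 (PySem.Int.mod numberOfRotations 4) 1).foldl
    (fun cur _ => pyZipStar cur.reverse) givenList

-- ===== PRECONDITION & SPEC =====
-- Pre_ excludes exactly the inputs where A raises IndexError: the empty matrix, and (when at
-- least one rotation happens) an empty first row or any row shorter than the first row.
def Pre_rotate_nested_lists (givenList : List (List Int)) (numberOfRotations : Int) : Prop :=
  givenList ≠ [] ∧
  (PySem.Int.mod numberOfRotations 4 ≠ 0 →
    0 < (givenList.headD []).length ∧
    ∀ row ∈ givenList, (givenList.headD []).length ≤ row.length)
instance (givenList : List (List Int)) (numberOfRotations : Int) : Decidable (Pre_rotate_nested_lists givenList numberOfRotations) := by unfold Pre_rotate_nested_lists; infer_instance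

def pvWitness_rotate_nested_lists : List (List Int) × Int := ([[1, 2], [3, 4], [5, 6]], 3)

def Spec_rotate_nested_lists (givenList : List (List Int)) (numberOfRotations : Int) (out : List (List Int)) : Prop := out = rotate_nested_lists_alt givenList numberOfRotations
instance (givenList : List (List Int)) (numberOfRotations : Int) (out : List (List Int)) : Decidable (Spec_rotate_nested_lists givenList numberOfRotations out) := by unfold Spec_rotate_nested_lists; infer_instance

-- ===== CLAIM (what is proved, stated in full; the proofs are below) =====
def Claim_equal_rotate_nested_lists : Prop := ∀ (givenList : List (List Int)) (numberOfRotations : Int), Dom_rotate_nested_lists givenList numberOfRotations → Pre_rotate_nested_lists givenList numberOfRotations → Spec_rotate_nested_lists givenList numberOfRotations (rotate_nested_lists givenList numberOfRotations)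
-- ===== LEMMAS AND PROOFS =====

-- the invariant a matrix satisfies before each rotation step
def RotInv (gl : List (List Int)) : Prop :=
  gl ≠ [] ∧ 0 < (gl.headD []).length ∧ ∀ row ∈ gl, (gl.headD []).length ≤ row.length

-- A's single rotation step, as the expression in A's body
def stepA (gl : List (List Int)) : List (List Int) :=
  (PySem.List.pyRange 0 (((PySem.List.pyGet? gl 0).getD []).length : Int) 1).map (fun j =>
    (PySem.List.pyRange 0 (gl.length : Int) 1).map (fun k =>
      PySem.List.pyGetD (PySem.List.pyGetD gl ((gl.length : Int) - k - 1) []) j 0))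

lemma headD_eq_getD (l : List Int) : l.headD 0 = l.getD 0 0 := by cases l <;> rfl

lemma getD_tail (l : List Int) (j : Nat) : l.tail.getD j 0 = l.getD (j + 1) 0 := by
  cases l <;> rfl

lemma pyZipStarGo_char : ∀ (fuel c : Nat) (xss : List (List Int)), c ≤ fuel →
    (∀ r ∈ xss, c ≤ r.length) → (∃ r ∈ xss, r.length = c) →
    pyZipStarGo fuel xss = (List.range c).map (fun j => xss.map (fun row => row.getD j 0)) := by
  intro fuel
  induction fuel with
  | zero =>
    intro c xss hc _ _
    obtain rfl : c = 0 := by omega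
    rfl
  | succ f ih =>
    intro c xss hc hge hex
    obtain ⟨r, hr, hr0⟩ := hex
    cases c with
    | zero =>
      simp only [pyZipStarGo]
      rw [if_neg]
      · rfl
      · rintro ⟨-, hall⟩
        have := (List.all_eq_true.mp hall) r hr
        simp [List.length_eq_zero_iff.mp hr0] at this
    | succ m =>
      have hne : xss ≠ [] := by rintro rfl; exact absurd hr (List.not_mem_nil)
      simp only [pyZipStarGo]
      rw [if_pos]
      · rw [ih m (xss.map List.tail) (by omega)
          (by intro t ht
              obtain ⟨row, hrow, rfl⟩ := List.mem_map.mp ht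
              have := hge row hrow
              simp [List.length_tail]; omega)
          ⟨r.tail, List.mem_map_of_mem hr, by simp [List.length_tail, hr0]⟩]
        simp only [List.range_succ_eq_map, List.map_cons, List.map_map]
        congr 1
        · exact List.map_congr_left (fun row _ => headD_eq_getD row)
        · exact List.map_congr_left (fun j _ => List.map_congr_left (fun row _ => getD_tail row j))
      · refine ⟨hne, List.all_eq_true.mpr fun row hrow => ?_⟩
        have := hge row hrow
        cases row with
        | nil => simp at this
        | cons a t => simp

lemma pyZipStar_char (c : Nat) (xss : List (List Int))
    (hge : ∀ r ∈ xss, c ≤ r.length) (hex : ∃ r ∈ xss, r.length = c) :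
    pyZipStar xss = (List.range c).map (fun j => xss.map (fun row => row.getD j 0)) := by
  have hne : xss ≠ [] := by
    obtain ⟨r, hr, -⟩ := hex
    rintro rfl; exact absurd hr (List.not_mem_nil)
  have hmem : xss.headD [] ∈ xss := by
    cases xss with
    | nil => exact absurd rfl hne
    | cons a t => exact List.mem_cons_self
  exact pyZipStarGo_char _ c xss (hge _ hmem) hge hex

lemma stepA_eq_stepB (gl : List (List Int)) (h : RotInv gl) :
    stepA gl = pyZipStar gl.reverse := by
  obtain ⟨hne, hpos, hge⟩ := h
  have hhead : (PySem.List.pyGet? gl 0).getD [] = gl.headD [] := by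
    cases gl with
    | nil => exact absurd rfl hne
    | cons a t => simp [PySem.List.pyGet?, PySem.List.pyIdx?]
  set c := (gl.headD []).length with hc
  rw [pyZipStar_char c gl.reverse
      (by intro r hr; exact hge r (List.mem_reverse.mp hr))
      ⟨gl.headD [], by
        cases gl with
        | nil => exact absurd rfl hne
        | cons a t => simp, rfl⟩]
  unfold stepA
  rw [hhead, ← hc]
  simp only [PySem.List.pyRange_zero_nat, List.map_map]
  refine List.map_congr_left fun j hj => ?_
  simp only [Function.comp]
  apply List.ext_getElem
  · simp
  · intro i h1 h2
    have hi : i < gl.length := by simpa using h1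
    simp only [List.getElem_map, List.getElem_range, List.getElem_reverse, Function.comp_apply]
    have hcast : (gl.length : Int) - (i : Int) - 1 = ((gl.length - 1 - i : Nat) : Int) := by omega
    rw [hcast, PySem.List.pyGetD_natCast, PySem.List.pyGetD_natCast,
      List.getD_eq_getElem gl [] (by omega)]

lemma stepB_shape (gl : List (List Int)) (h : RotInv gl) :
    pyZipStar gl.reverse
      = (List.range (gl.headD []).length).map (fun j => gl.reverse.map (fun row => row.getD j 0)) := by
  obtain ⟨hne, hpos, hge⟩ := h
  refine pyZipStar_char _ _ (fun r hr => hge r (List.mem_reverse.mp hr)) ⟨gl.headD [], ?_, rfl⟩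
  cases gl with
  | nil => exact absurd rfl hne
  | cons a t => simp

lemma inv_step (gl : List (List Int)) (h : RotInv gl) : RotInv (pyZipStar gl.reverse) := by
  have hsh := stepB_shape gl h
  obtain ⟨hne, hpos, hge⟩ := h
  have hlen : 0 < gl.length := List.length_pos_iff.mpr hne
  obtain ⟨j0, js, hx⟩ : ∃ j0 js, List.range (gl.headD []).length = j0 :: js := by
    cases hx : List.range (gl.headD []).length with
    | nil => simp only [List.range_eq_nil] at hx; omega
    | cons a b => exact ⟨a, b, rfl⟩
  rw [hsh, hx]
  refine ⟨by simp, ?_, ?_⟩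
  · simp only [List.map_cons, List.headD_cons, List.length_map, List.length_reverse]
    exact hlen
  · intro row hrow
    simp only [List.map_cons, List.headD_cons, List.length_map, List.length_reverse]
    rcases List.mem_cons.mp hrow with h1 | h1
    · subst h1; simp
    · obtain ⟨j, hj, rfl⟩ := List.mem_map.mp h1; simp

lemma foldl_const_len {α : Type} (g : α → α) :
    ∀ (l1 l2 : List Int) (x : α), l1.length = l2.length →
    l1.foldl (fun c _ => g c) x = l2.foldl (fun c _ => g c) x := by
  intro l1
  induction l1 with
  | nil => intro l2 x h; cases l2 with
    | nil => rfl
    | cons a b => simp at h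
  | cons a t ih => intro l2 x h; cases l2 with
    | nil => simp at h
    | cons b s =>
      simp only [List.foldl_cons]
      exact ih s (g x) (by simpa using h)

lemma mod_self_small (r : Nat) (hr : r < 4) : PySem.Int.mod (r : Int) 4 = (r : Int) := by
  rw [PySem.Int.mod_eq_emod_of_pos (by norm_num)]
  omega

lemma main_loop : ∀ (r : Nat), r < 4 → ∀ (gl : List (List Int)) (n : Int),
    PySem.Int.mod n 4 = (r : Int) → (r ≠ 0 → RotInv gl) →
    rotate_nested_lists gl n
      = (PySem.List.pyRange 0 (r : Int) 1).foldl (fun cur _ => pyZipStar cur.reverse) gl := by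
  intro r
  induction r with
  | zero =>
    intro _ gl n hmod _
    rw [rotate_nested_lists]
    simp only [hmod, Nat.cast_zero]
    norm_num [PySem.List.pyRange_one_eq_nil]
  | succ r ih =>
    intro hr gl n hmod hinv
    have hinv' := hinv (Nat.succ_ne_zero r)
    rw [rotate_nested_lists]
    simp only [hmod]
    rw [if_neg (show ¬(((r + 1 : Nat) : Int) < 0) by omega),
      if_pos (show (0 : Int) < ((r + 1 : Nat) : Int) by omega)]
    have hstep : stepA gl = pyZipStar gl.reverse := stepA_eq_stepB gl hinv'
    have harg : ((r + 1 : Nat) : Int) - 1 = (r : Int) := by omega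
    rw [show ((PySem.List.pyRange 0 (((PySem.List.pyGet? gl 0).getD []).length : Int) 1).map (fun j =>
      (PySem.List.pyRange 0 (gl.length : Int) 1).map (fun k =>
        PySem.List.pyGetD (PySem.List.pyGetD gl ((gl.length : Int) - k - 1) []) j 0))) = stepA gl from rfl]
    rw [harg, ih (by omega) (stepA gl) (r : Int) (mod_self_small r (by omega))
        (fun _ => hstep ▸ inv_step gl hinv')]
    rw [hstep]
    rw [PySem.List.pyRange_one_cons (a := 0) (b := ((r + 1 : Nat) : Int)) (by omega)]
    simp only [List.foldl_cons, zero_add]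
    exact foldl_const_len _ _ _ _ (by simp [PySem.List.length_pyRange_one])

-- ===== VERDICT (by name: the statement is the Claim_ definition above) =====
theorem rotate_nested_lists_spec : Claim_equal_rotate_nested_lists := by
  intro gl n _ hpre
  obtain ⟨hne, hrest⟩ := hpre
  unfold Spec_rotate_nested_lists rotate_nested_lists_alt
  have h0 := PySem.Int.mod_nonneg n (b := 4) (by norm_num)
  have h1 := PySem.Int.mod_lt n (b := 4) (by norm_num)
  set r : Nat := (PySem.Int.mod n 4).toNat with hrdef
  have hmod : PySem.Int.mod n 4 = (r : Int) := by omega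
  rw [hmod]
  exact main_loop r (by omega) gl n hmod
    (fun hr0 => ⟨hne, (hrest (by omega)).1, (hrest (by omega)).2⟩)
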